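-- pv_equiv track=rewrite | github.com/baekeunsun/Algorithm | 프로그래머스/unrated/142085. 디펜스 게임/디펜스 게임.py | solution
-- ===== SOURCE A (Python) =====
-- import heapq
--
-- def solution(n, k, enemy):
--     if k >= len(enemy) :
--         return len(enemy)
--
--     answer = 0
--     game = []
--     tmp = 0
--
--     for i in range(len(enemy)) :
--         heapq.heappush(game,-enemy[i])
--         if n >= enemy[i] :
--             n -= enemy[i]   # 싸움
--             answer += 1
--         else :
--             n -= enemy[i]
--             if k > 0:   # 무적권 사용
--                 n += -heapq.heappop(game)
--                 k -= 1
--                 answer += 1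
--             else :  # 무적권 사용할 수 X -> 종료
--                 break
--     return answer
-- ===== SOURCE B (Python) =====
-- def solution(n, k, enemy):
--     if k >= len(enemy):
--         return len(enemy)
--     # indices of stages ordered by enemy strength, strongest first (stable)
--     order = sorted(range(len(enemy)), key=lambda j: enemy[j], reverse=True)
--     used = [False] * len(enemy)
--     answer = 0
--     for i in range(len(enemy)):
--         e = enemy[i]
--         if n >= e:
--             n -= e
--         elif k > 0:
--             # refund the strongest not-yet-refunded enemy among stages 0..i
--             for j in order:
--                 if j <= i and not used[j]:
--                     used[j] = True
--                     n += enemy[j] - e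
--                     break
--             k -= 1
--         else:
--             break
--         answer += 1
--     return answer
-- ===== Notes on version B (the rewrite author's own statement) =====
-- stated objective: alternative
-- what changed: Replaces the incrementally grown max-heap (heapq on negated values) by a single upfront descending sort of the stage indices plus a used-flag scan that picks each refunded stage, so no priority queue is maintained during the pass over enemy.
import Mathlib
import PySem

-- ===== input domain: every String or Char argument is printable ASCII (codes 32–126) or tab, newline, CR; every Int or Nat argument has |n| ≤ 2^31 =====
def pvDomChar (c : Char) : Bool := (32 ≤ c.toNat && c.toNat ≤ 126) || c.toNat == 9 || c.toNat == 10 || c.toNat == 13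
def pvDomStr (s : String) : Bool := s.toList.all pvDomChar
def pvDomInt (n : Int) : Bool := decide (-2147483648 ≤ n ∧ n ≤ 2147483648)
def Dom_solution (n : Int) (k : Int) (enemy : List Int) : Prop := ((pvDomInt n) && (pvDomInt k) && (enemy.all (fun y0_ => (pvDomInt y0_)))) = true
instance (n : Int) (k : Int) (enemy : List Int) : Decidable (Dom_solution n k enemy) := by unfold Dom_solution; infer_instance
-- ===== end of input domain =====

-- B replaces A's incremental max-heap by a one-off descending sort of the stage
-- indices plus a used-flag scan to find each refund (objective: alternative).


-- ===== PORT A =====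
-- heapq is not in PySem; A only ever observes the heap through the values heappop
-- returns (the current minimum), never through the internal array layout, so the
-- heap is ported as the multiset of its elements: heappush = cons, heappop =
-- (minimum, one occurrence of it erased).  Exact for everything A observes.
def heapPush (game : List Int) (x : Int) : List Int := x :: game

def heapPop : List Int → Int × List Int
  | [] => (0, [])          -- heapq.heappop raises on []; A never pops an empty heap
  | x :: t => ((x :: t).foldl min x, (x :: t).erase ((x :: t).foldl min x))

def solutionLoop : Int → Int → List Int → Int → List Int → Int
  | _, _, _, answer, [] => answer
  | n, k, game, answer, e :: rest =>
      let game' := heapPush game (-e)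
      if n ≥ e then solutionLoop (n - e) k game' (answer + 1) rest
      else if k > 0 then
        let p := heapPop game'
        solutionLoop (n - e + (- p.1)) (k - 1) p.2 (answer + 1) rest
      else answer

def solution (n : Int) (k : Int) (enemy : List Int) : Int :=
  if k ≥ (enemy.length : Int) then (enemy.length : Int)
  else solutionLoop n k [] 0 enemy

-- ===== PORT B =====
-- sorted(range(len(enemy)), key=lambda j: enemy[j], reverse=True)
def stageOrder (enemy : List Int) : List Nat :=
  PySem.List.sorted (List.range enemy.length) (fun j => enemy.getD j 0) true

def altLoop (enemy : List Int) (order : List Nat) :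
    Int → Int → List Bool → Nat → Int → List Int → Int
  | _, _, _, _, answer, [] => answer
  | n, k, used, i, answer, e :: rest =>
      if n ≥ e then altLoop enemy order (n - e) k used (i + 1) (answer + 1) rest
      else if k > 0 then
        match order.find? (fun j => decide (j ≤ i) && !(used.getD j false)) with
        | some j => altLoop enemy order (n + enemy.getD j 0 - e) (k - 1)
            (used.set j true) (i + 1) (answer + 1) rest
        | none => altLoop enemy order n (k - 1) used (i + 1) (answer + 1) rest
      else answer

def solution_alt (n : Int) (k : Int) (enemy : List Int) : Int :=
  if k ≥ (enemy.length : Int) then (enemy.length : Int)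
  else altLoop enemy (stageOrder enemy) n k (List.replicate enemy.length false) 0 0 enemy

-- ===== PRECONDITION & SPEC =====
def Spec_solution (n : Int) (k : Int) (enemy : List Int) (out : Int) : Prop := out = solution_alt n k enemy
instance (n : Int) (k : Int) (enemy : List Int) (out : Int) : Decidable (Spec_solution n k enemy out) := by unfold Spec_solution; infer_instance

-- ===== CLAIM (what is proved, stated in full; the proofs are below) =====
def Claim_equal_solution : Prop := ∀ (n : Int) (k : Int) (enemy : List Int), Dom_solution n k enemy → Spec_solution n k enemy (solution n k enemy)

-- ===== LEMMAS AND PROOFS =====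

-- the (negated) values of the stages < i that are still refundable
def elig (enemy : List Int) (i : Nat) (used : List Bool) : List Int :=
  ((List.range i).filter (fun j => !(used.getD j false))).map (fun j => -(enemy.getD j 0))

theorem foldl_min_mem (t : List Int) : ∀ x : Int, t.foldl min x ∈ x :: t := by
  induction t with
  | nil => intro x; simp
  | cons y ys ih =>
    intro x
    simp only [List.foldl_cons]
    rcases List.mem_cons.mp (ih (min x y)) with h | h
    · rcases min_choice x y with hm | hm
      · rw [h, hm]; exact List.mem_cons_self
      · rw [h, hm]; exact List.mem_cons_of_mem _ List.mem_cons_self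
    · exact List.mem_cons_of_mem _ (List.mem_cons_of_mem _ h)

theorem foldl_min_le (t : List Int) : ∀ x : Int, ∀ y ∈ x :: t, t.foldl min x ≤ y := by
  induction t with
  | nil =>
    intro x y hy
    simp only [List.mem_cons, List.not_mem_nil, or_false] at hy
    simp [hy]
  | cons z zs ih =>
    intro x y hy
    simp only [List.foldl_cons]
    have hbase : zs.foldl min (min x z) ≤ min x z :=
      ih (min x z) (min x z) List.mem_cons_self
    rcases List.mem_cons.mp hy with rfl | hy'
    · exact le_trans hbase (min_le_left _ _)
    · rcases List.mem_cons.mp hy' with rfl | hy''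
      · exact le_trans hbase (min_le_right _ _)
      · exact ih (min x z) y (List.mem_cons_of_mem _ hy'')

theorem find?_pairwise_max {κ : Type} (key : κ → Int) (p : κ → Bool) :
    ∀ (l : List κ) (a : κ), l.Pairwise (fun a b => key b ≤ key a) →
      l.find? p = some a → ∀ x ∈ l, p x = true → key x ≤ key a := by
  intro l
  induction l with
  | nil => intro a _ h; simp at h
  | cons h t ih =>
    intro a hpw hf x hx hpx
    rcases List.pairwise_cons.mp hpw with ⟨hht, hpt⟩
    by_cases hph : p h = true
    · rw [List.find?_cons_of_pos hph] at hf
      cases hf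
      rcases List.mem_cons.mp hx with rfl | hx
      · exact le_refl _
      · exact hht x hx
    · rw [List.find?_cons_of_neg (by simpa using hph)] at hf
      rcases List.mem_cons.mp hx with rfl | hx
      · exact absurd hpx hph
      · exact ih a hpt hf x hx hpx

-- marking index j used removes one copy of its (negated) value from elig
theorem filter_mark_perm {f : Nat → Int} :
    ∀ (l : List Nat) (p p' : Nat → Bool) (j : Nat), l.Nodup → j ∈ l → p j = true →
      p' j = false → (∀ a, a ≠ j → p' a = p a) →
      ((l.filter p').map f).Perm (((l.filter p).map f).erase (f j)) := by
  intro l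
  induction l with
  | nil => intro _ _ _ _ hj; simp at hj
  | cons x t ih =>
    intro p p' j hnd hj hpj hp'j hagree
    rcases List.nodup_cons.mp hnd with ⟨hxt, hndt⟩
    rcases List.mem_cons.mp hj with rfl | hjt
    · -- head is j: it is dropped by p' and erased from the p-side
      have ht' : t.filter p' = t.filter p := by
        apply List.filter_congr
        intro a ha
        exact hagree a (fun h => hxt (h ▸ ha))
      simp [hp'j, hpj, ht']
    · have hxj : x ≠ j := fun h => hxt (h ▸ hjt)
      have hp'x : p' x = p x := hagree x hxj
      have IH := ih p p' j hndt hjt hpj hp'j hagree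
      by_cases hpx : p x = true
      · have e1 : ((x :: t).filter p').map f = f x :: (t.filter p').map f := by
          simp [hp'x, hpx]
        have e2 : ((x :: t).filter p).map f = f x :: (t.filter p).map f := by
          simp [hpx]
        have hfj : f j ∈ (t.filter p).map f :=
          List.mem_map_of_mem (List.mem_filter.mpr ⟨hjt, hpj⟩)
        by_cases hval : f x = f j
        · rw [e1, e2, hval, List.erase_cons_head]
          exact ((IH.cons (f j)).trans (hval ▸ (List.perm_cons_erase hfj).symm))
        · rw [e1, e2, List.erase_cons_tail (by simpa using hval)]
          exact IH.cons (f x)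
      · have hpx' : p x = false := by simpa using hpx
        have hp'x' : p' x = false := by rw [hp'x, hpx']
        simpa [List.filter_cons, hpx', hp'x'] using IH

theorem getD_replicate_false (m j : Nat) : (List.replicate m false).getD j false = false := by
  unfold List.getD
  rw [List.getElem?_replicate]
  split <;> rfl

theorem loop_eq (enemy : List Int) :
    ∀ (rest : List Int) (i : Nat) (n k answer : Int) (game : List Int) (used : List Bool),
      enemy.drop i = rest →
      used.length = enemy.length →
      (∀ j, i ≤ j → used.getD j false = false) →
      game.Perm (elig enemy i used) →
      solutionLoop n k game answer rest = altLoop enemy (stageOrder enemy) n k used i answer rest := by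
  intro rest
  induction rest with
  | nil => intro i n k answer game used _ _ _ _; simp [solutionLoop, altLoop]
  | cons e rest ih =>
    intro i n k answer game used hdrop hlen hfresh hperm
    have hi : i < enemy.length := by
      by_contra h
      rw [List.drop_eq_nil_of_le (by omega)] at hdrop
      exact List.cons_ne_nil e rest hdrop.symm
    have hei : enemy.getD i 0 = e := by
      have h0 : (enemy.drop i)[0]? = some e := by rw [hdrop]; rfl
      rw [List.getElem?_drop] at h0
      have h0' : enemy[i]? = some e := by simpa using h0
      simp [List.getD, h0']
    have hdrop' : enemy.drop (i + 1) = rest := by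
      have h1 : List.drop 1 (enemy.drop i) = rest := by rw [hdrop]; rfl
      rwa [List.drop_drop] at h1
    have hui : used.getD i false = false := hfresh i (le_refl i)
    have hui' : used[i]?.getD false = false := hui
    have hei' : enemy[i]?.getD 0 = e := hei
    -- after the push the heap is the multiset of refundable stages < i+1
    have hperm' : ((-e) :: game).Perm (elig enemy (i + 1) used) := by
      have hsplit : elig enemy (i + 1) used = elig enemy i used ++ [-e] := by
        simp [elig, List.range_succ, List.filter_append, hui', hei']
      rw [hsplit]
      exact (hperm.cons (-e)).trans (List.perm_append_singleton (-e) _).symm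
    by_cases hfight : n ≥ e
    · simp only [solutionLoop, altLoop, heapPush, if_pos hfight]
      exact ih (i + 1) (n - e) k (answer + 1) ((-e) :: game) used hdrop' hlen
        (fun j hj => hfresh j (by omega)) hperm'
    · by_cases hk : k > 0
      · -- pass branch: find? finds the strongest refundable stage
        have hnd_order : (stageOrder enemy).Nodup :=
          (PySem.List.sorted_perm _ _ _).nodup_iff.mpr List.nodup_range
        have hmem_order : ∀ j : Nat, j ∈ stageOrder enemy ↔ j < enemy.length := by
          intro j
          rw [stageOrder, PySem.List.mem_sorted, List.mem_range]
        have hpw : (stageOrder enemy).Pairwise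
            (fun a b => enemy.getD b 0 ≤ enemy.getD a 0) :=
          PySem.List.sorted_pairwise_rev _ _
        have hpi : (fun j => decide (j ≤ i) && !(used.getD j false)) i = true := by
          simp [hui']
        have hsome : ((stageOrder enemy).find?
            (fun j => decide (j ≤ i) && !(used.getD j false))).isSome := by
          rw [List.find?_isSome]
          exact ⟨i, (hmem_order i).mpr hi, hpi⟩
        rcases Option.isSome_iff_exists.mp hsome with ⟨j, hfind⟩
        have hpj := List.find?_some hfind
        have hji : j ≤ i := by
          have h := (Bool.and_eq_true _ _).mp hpj
          exact of_decide_eq_true h.1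
        have huj : used.getD j false = false := by
          have h := (Bool.and_eq_true _ _).mp hpj
          simpa using h.2
        have hjlen : j < enemy.length := (hmem_order j).mp (List.mem_of_find?_eq_some hfind)
        have hjused : j < used.length := by omega
        have huj' : used[j]?.getD false = false := huj
        -- -(enemy[j]) is a member of elig (i+1) and a lower bound for it
        have hjelig : -(enemy.getD j 0) ∈ elig enemy (i + 1) used := by
          apply List.mem_map_of_mem
          exact List.mem_filter.mpr ⟨List.mem_range.mpr (by omega), by simp [huj']⟩
        have hlb : ∀ y ∈ elig enemy (i + 1) used, -(enemy.getD j 0) ≤ y := by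
          intro y hy
          rcases List.mem_map.mp hy with ⟨j', hj', rfl⟩
          rcases List.mem_filter.mp hj' with ⟨hj'r, hj'u⟩
          have hj'i : j' ≤ i := by
            have h := List.mem_range.mp hj'r; omega
          have hj'len : j' < enemy.length := by omega
          have hpj' : (fun a => decide (a ≤ i) && !(used.getD a false)) j' = true := by
            simp only [Bool.and_eq_true, decide_eq_true_eq]
            exact ⟨hj'i, by simpa using hj'u⟩
          have h := find?_pairwise_max (fun a => enemy.getD a 0) _ (stageOrder enemy) j hpw
            hfind j' ((hmem_order j').mpr hj'len) hpj'
          have h' : enemy.getD j' 0 ≤ enemy.getD j 0 := by simpa using h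
          omega
        -- the popped minimum is exactly -(enemy[j])
        have hm : ((-e) :: game).foldl min (-e) = -(enemy.getD j 0) := by
          have hmem : ((-e) :: game).foldl min (-e) ∈ (-e) :: (-e) :: game :=
            foldl_min_mem _ _
          have hmem' : ((-e) :: game).foldl min (-e) ∈ (-e) :: game := by
            rcases List.mem_cons.mp hmem with h | h
            · rw [h]; exact List.mem_cons_self
            · exact h
          have h1 : -(enemy.getD j 0) ≤ ((-e) :: game).foldl min (-e) :=
            hlb _ (hperm'.mem_iff.mp hmem')
          have h2 : ((-e) :: game).foldl min (-e) ≤ -(enemy.getD j 0) :=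
            foldl_min_le _ _ _ (List.mem_cons_of_mem _ (hperm'.symm.mem_iff.mp hjelig))
          omega
        -- the new heap is the new elig multiset
        have hperm'' : (((-e) :: game).erase (-(enemy.getD j 0))).Perm
            (elig enemy (i + 1) (used.set j true)) := by
          have h1 := hperm'.erase (-(enemy.getD j 0))
          have h2 : (elig enemy (i + 1) (used.set j true)).Perm
              ((elig enemy (i + 1) used).erase (-(enemy.getD j 0))) := by
            have h3 := filter_mark_perm (f := fun a => -(enemy.getD a 0))
              (List.range (i + 1))
              (fun a => !(used.getD a false))
              (fun a => !((used.set j true).getD a false)) j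
              List.nodup_range (List.mem_range.mpr (by omega)) (by simp [huj'])
              (by simp [List.getD, List.getElem?_set_self hjused])
              (by
                intro a haj
                by_cases halen : a < used.length
                · simp [List.getD, List.getElem?_set_ne (Ne.symm haj)]
                · have hn1 : (used.set j true)[a]? = none :=
                    List.getElem?_eq_none (by simp only [List.length_set]; omega)
                  have hn2 : used[a]? = none :=
                    List.getElem?_eq_none (by omega)
                  simp [List.getD, hn1, hn2])
            simpa [elig] using h3
          exact h1.trans h2.symm
        have hfresh' : ∀ j', i + 1 ≤ j' → (used.set j true).getD j' false = false := by
          intro j' hj'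
          have hne : j ≠ j' := by omega
          by_cases hl : j' < used.length
          · simpa [List.getD, List.getElem?_set_ne hne] using hfresh j' (by omega)
          · have hn1 : (used.set j true)[j']? = none :=
              List.getElem?_eq_none (by simp only [List.length_set]; omega)
            simp [List.getD, hn1]
        simp only [solutionLoop, altLoop, heapPush, if_neg hfight, if_pos hk, hfind]
        simp only [heapPop, hm]
        have harith : n - e + -(-(enemy.getD j 0)) = n + enemy.getD j 0 - e := by ring
        rw [harith]
        exact ih (i + 1) (n + enemy.getD j 0 - e) (k - 1) (answer + 1)
          (((-e) :: game).erase (-(enemy.getD j 0))) (used.set j true) hdrop'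
          (by simpa using hlen) hfresh' hperm''
      · simp only [solutionLoop, altLoop, if_neg hfight, if_neg hk]

-- ===== VERDICT (by name: the statement is the Claim_ definition above) =====
theorem solution_spec : Claim_equal_solution := by
  intro n k enemy _
  unfold Spec_solution solution solution_alt
  by_cases hk : k ≥ (enemy.length : Int)
  · rw [if_pos hk, if_pos hk]
  · rw [if_neg hk, if_neg hk]
    exact loop_eq enemy enemy 0 n k 0 [] (List.replicate enemy.length false) rfl
      (by simp) (fun j _ => getD_replicate_false _ _)
      (by simp [elig])
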